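-- pv_equiv track=rewrite | github.com/kyosukekita/ROSALIND | Bioinformatics Stronghold/motzkin_numbers_and_rna_secondary_structures.py | motzkin
-- ===== SOURCE A (Python) =====
-- cache={}
--
-- def motzkin(rna):
--     rna=rna.replace("\n","")
--
--     if rna in cache:
--         return cache[rna]
--
--     if len(rna)==0 or len(rna)==1:
--         return 1
--
--     cache[rna]=motzkin(rna[1:])
--     for i in range(1,len(rna)):
--         if(rna[0]=="A" and rna[i]=="U") or(rna[0]=="G" and rna[i]=="C") or (rna[0]=="C" and rna[i]=="G") or (rna[0]=="U" and rna[i]=="A"):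
--             cache[rna]+=(motzkin(rna[1:i])*motzkin(rna[i+1:]))
--
--     cache[rna]%=(10**6)
--     return cache[rna]
-- ===== SOURCE B (Python) =====
-- def motzkin(rna):
--     s = rna.replace("\n", "")
--     n = len(s)
--     MOD = 10 ** 6
--     pair = {('A', 'U'), ('U', 'A'), ('G', 'C'), ('C', 'G')}
--     # dp[i][j] = number of noncrossing matchings of s[i:j] (mod MOD); empty/1-char = 1
--     dp = [[1] * (n + 1) for _ in range(n + 1)]
--     for L in range(2, n + 1):
--         for i in range(0, n - L + 1):
--             j = i + L
--             total = dp[i + 1][j]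
--             for k in range(i + 1, j):
--                 if (s[i], s[k]) in pair:
--                     total += dp[i + 1][k] * dp[k + 1][j]
--             dp[i][j] = total % MOD
--     return dp[0][n]
-- ===== Notes on version B (the rewrite author's own statement) =====
-- stated objective: alternative
-- what changed: Replaced the top-down memoized recursion keyed by substring strings (global dict cache) with an iterative bottom-up 2-D interval DP over index pairs, filled by increasing interval length.
import Mathlib
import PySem

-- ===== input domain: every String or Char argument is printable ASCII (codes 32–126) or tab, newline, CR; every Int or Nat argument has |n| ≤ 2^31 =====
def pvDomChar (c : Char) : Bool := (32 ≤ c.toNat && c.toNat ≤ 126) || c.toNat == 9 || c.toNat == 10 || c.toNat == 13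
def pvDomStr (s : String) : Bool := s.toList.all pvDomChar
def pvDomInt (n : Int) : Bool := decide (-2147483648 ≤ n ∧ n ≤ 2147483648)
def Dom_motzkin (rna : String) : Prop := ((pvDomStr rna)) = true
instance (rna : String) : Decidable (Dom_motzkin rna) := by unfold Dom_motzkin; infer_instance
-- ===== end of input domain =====

-- B replaces A's top-down memoized recursion (global dict keyed by substring strings) with an
-- iterative bottom-up 2-D interval DP filled by increasing interval length; return values agree.
-- Note: Python A also mutates a module-level cache across calls (a side effect); the equivalence
-- proved here is about the return value, and the cache is modelled per-call (same return value).

-- ===== PORT A =====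
def pvPair (x y : Char) : Bool :=
  (x == 'A' && y == 'U') || (x == 'G' && y == 'C') || (x == 'C' && y == 'G') || (x == 'U' && y == 'A')

-- the memoized recursion of A with the cache threaded through explicitly; fuel = recursion depth
-- bound (each recursive call is on a strictly shorter string).  Python's recursive calls re-run
-- rna.replace("\n","") — a no-op on the newline-free substrings the recursion passes — so the
-- strip is done once in the wrapper below, exactly as it takes effect in A.
def mzA : Nat → List Char → PySem.Dict (List Char) Int → Int × PySem.Dict (List Char) Int
  | 0, _, c => (0, c)
  | f+1, s, c =>
    if c.contains s then (c.getD s 0, c)                      -- if rna in cache: return cache[rna]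
    else if s.length = 0 ∨ s.length = 1 then (1, c)
    else
      let r0 := mzA f (PySem.List.slice s (some 1) none) c    -- cache[rna] = motzkin(rna[1:])
      let c1 := r0.2.insert s r0.1
      let c2 := (PySem.List.pyRange 1 (s.length : Int) 1).foldl (fun cc i =>
        if pvPair (PySem.List.pyGetD s 0 ' ') (PySem.List.pyGetD s i ' ') then
          let ra := mzA f (PySem.List.slice s (some 1) (some i)) cc
          let rb := mzA f (PySem.List.slice s (some (i + 1)) none) ra.2
          rb.2.modify s 0 (fun v => v + ra.1 * rb.1)          -- cache[rna] += m(rna[1:i])*m(rna[i+1:])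
        else cc) c1
      let c3 := c2.modify s 0 (fun v => PySem.Int.mod v 1000000)   -- cache[rna] %= 10**6
      (c3.getD s 0, c3)

def motzkin (rna : String) : Int :=
  let s := PySem.Chars.replace rna.toList ['\n'] []
  (mzA (s.length + 1) s PySem.Dict.empty).1

-- ===== PORT B =====
-- bottom-up interval DP: dp i j = count for s[i:j]; the (n+1)x(n+1) list-of-lists of Source B is
-- modelled as a function Nat → Nat → Int updated pointwise (dp[i][j] = v).
def motzkin_alt (rna : String) : Int :=
  let s := PySem.Chars.replace rna.toList ['\n'] []
  let n := s.length
  let dp : Nat → Nat → Int :=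
    (List.range' 2 (n - 1)).foldl (fun dp L =>                -- for L in range(2, n+1)
      (List.range (n - L + 1)).foldl (fun dp i =>             -- for i in range(0, n-L+1)
        let j := i + L
        let total := (List.range' (i + 1) (L - 1)).foldl (fun t k =>   -- for k in range(i+1, j)
          if pvPair s[i]! s[k]! then t + dp (i + 1) k * dp (k + 1) j else t) (dp (i + 1) j)
        fun a b => if a = i ∧ b = j then PySem.Int.mod total 1000000 else dp a b) dp)
      (fun _ _ => (1 : Int))
  dp 0 n

-- ===== PRECONDITION & SPEC =====
def Spec_motzkin (rna : String) (out : Int) : Prop := out = motzkin_alt rna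
instance (rna : String) (out : Int) : Decidable (Spec_motzkin rna out) := by unfold Spec_motzkin; infer_instance

-- ===== CLAIM (what is proved, stated in full; the proofs are below) =====
def Claim_equal_motzkin : Prop := ∀ (rna : String), Dom_motzkin rna → Spec_motzkin rna (motzkin rna)

-- ===== LEMMAS AND PROOFS =====

-- the common mathematical form of both programs: the recurrence, written with exactly A's
-- primitives; fuel only for termination (MzF_eq_Mz shows it is irrelevant), Mz the value.
def MzF : Nat → List Char → Int
  | 0, _ => 0
  | f+1, s =>
    if s.length = 0 ∨ s.length = 1 then 1
    else PySem.Int.mod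
      ((PySem.List.pyRange 1 (s.length : Int) 1).foldl
        (fun acc i => if pvPair (PySem.List.pyGetD s 0 ' ') (PySem.List.pyGetD s i ' ')
          then acc + MzF f (PySem.List.slice s (some 1) (some i)) * MzF f (PySem.List.slice s (some (i + 1)) none)
          else acc)
        (MzF f (PySem.List.slice s (some 1) none)))
      1000000

def Mz (s : List Char) : Int := MzF (s.length + 1) s

lemma MzF_eq_Mz : ∀ (n : Nat) (s : List Char), s.length ≤ n → ∀ f, s.length < f → MzF f s = Mz s := by
  intro n
  induction n using Nat.strong_induction_on with
  | _ n ih =>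
    intro s hs f hf
    obtain ⟨f', rfl⟩ : ∃ f', f = f' + 1 := ⟨f - 1, by omega⟩
    show MzF (f' + 1) s = MzF (s.length + 1) s
    simp only [MzF]
    by_cases hlen : s.length = 0 ∨ s.length = 1
    · rw [if_pos hlen, if_pos hlen]
    · rw [if_neg hlen, if_neg hlen]
      have hn2 : 2 ≤ s.length := by omega
      congr 1
      have hinit : ∀ g, s.length ≤ g → MzF g (PySem.List.slice s (some 1) none) = Mz (PySem.List.slice s (some 1) none) := by
        intro g hg
        rw [PySem.List.slice_from_one]
        exact ih (n - 1) (by omega) s.tail (by simp [List.length_tail]; omega) g (by simp [List.length_tail]; omega)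
      rw [hinit f' (by omega), hinit s.length (by omega)]
      have hbody : ∀ g, s.length ≤ g →
          List.foldl (fun acc i => if pvPair (PySem.List.pyGetD s 0 ' ') (PySem.List.pyGetD s i ' ')
            then acc + MzF g (PySem.List.slice s (some 1) (some i)) * MzF g (PySem.List.slice s (some (i + 1)) none)
            else acc) (Mz (PySem.List.slice s (some 1) none)) (PySem.List.pyRange 1 (s.length : Int) 1)
          = List.foldl (fun acc i => if pvPair (PySem.List.pyGetD s 0 ' ') (PySem.List.pyGetD s i ' ')
            then acc + Mz (PySem.List.slice s (some 1) (some i)) * Mz (PySem.List.slice s (some (i + 1)) none)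
            else acc) (Mz (PySem.List.slice s (some 1) none)) (PySem.List.pyRange 1 (s.length : Int) 1) := by
        intro g hg
        apply PySem.List.foldl_congr_mem
        intro acc i hi
        rw [PySem.List.mem_pyRange_one] at hi
        have e1 : MzF g (PySem.List.slice s (some 1) (some i)) = Mz (PySem.List.slice s (some 1) (some i)) := by
          rw [PySem.List.slice_toNat s (a := 1) (b := i) (by norm_num) (by omega)]
          apply ih (n - 1) (by omega)
          · simp only [List.length_take, List.length_drop]; omega
          · simp only [List.length_take, List.length_drop]; omega
        have e2 : MzF g (PySem.List.slice s (some (i + 1)) none) = Mz (PySem.List.slice s (some (i + 1)) none) := by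
          rw [PySem.List.slice_from s (a := i + 1) (by omega)]
          apply ih (n - 1) (by omega)
          · simp only [List.length_drop]; omega
          · simp only [List.length_drop]; omega
        rw [e1, e2]
      rw [hbody f' (by omega), hbody s.length (by omega)]

lemma Mz_unfold (s : List Char) (h : 2 ≤ s.length) :
    Mz s = PySem.Int.mod
      ((PySem.List.pyRange 1 (s.length : Int) 1).foldl
        (fun acc i => if pvPair (PySem.List.pyGetD s 0 ' ') (PySem.List.pyGetD s i ' ')
          then acc + Mz (PySem.List.slice s (some 1) (some i)) * Mz (PySem.List.slice s (some (i + 1)) none)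
          else acc)
        (Mz (PySem.List.slice s (some 1) none))) 1000000 := by
  show MzF (s.length + 1) s = _
  simp only [MzF]
  rw [if_neg (by omega)]
  congr 1
  have hinit : MzF s.length (PySem.List.slice s (some 1) none) = Mz (PySem.List.slice s (some 1) none) := by
    rw [PySem.List.slice_from_one]
    exact MzF_eq_Mz s.length s.tail (by simp [List.length_tail]) s.length (by simp [List.length_tail]; omega)
  rw [hinit]
  apply PySem.List.foldl_congr_mem
  intro acc i hi
  rw [PySem.List.mem_pyRange_one] at hi
  have e1 : MzF s.length (PySem.List.slice s (some 1) (some i)) = Mz (PySem.List.slice s (some 1) (some i)) := by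
    rw [PySem.List.slice_toNat s (a := 1) (b := i) (by norm_num) (by omega)]
    apply MzF_eq_Mz s.length
    · simp only [List.length_take, List.length_drop]; omega
    · simp only [List.length_take, List.length_drop]; omega
  have e2 : MzF s.length (PySem.List.slice s (some (i + 1)) none) = Mz (PySem.List.slice s (some (i + 1)) none) := by
    rw [PySem.List.slice_from s (a := i + 1) (by omega)]
    apply MzF_eq_Mz s.length
    · simp only [List.length_drop]; omega
    · simp only [List.length_drop]; omega
  rw [e1, e2]

lemma Mz_small (s : List Char) (h : s.length = 0 ∨ s.length = 1) : Mz s = 1 := by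
  show MzF _ _ = 1
  simp only [MzF]
  rw [if_pos h]

lemma mzA_loop (f : Nat) (s : List Char) (c : PySem.Dict (List Char) Int)
    (HIH : ∀ (t : List Char) (c' : PySem.Dict (List Char) Int), t.length < f →
      (∀ k, c'.contains k = true → k.length ≤ t.length → c'.getD k 0 = Mz k) →
      (mzA f t c').1 = Mz t
      ∧ (∀ k, (mzA f t c').2.contains k = true → k.length ≤ t.length → (mzA f t c').2.getD k 0 = Mz k)
      ∧ (∀ k, t.length < k.length →
          (mzA f t c').2.contains k = c'.contains k ∧ (mzA f t c').2.getD k 0 = c'.getD k 0))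
    (hf : s.length ≤ f) :
    ∀ (I : List Int), (∀ i ∈ I, 1 ≤ i ∧ i < (s.length : Int)) →
    ∀ (cc : PySem.Dict (List Char) Int) (acc : Int),
      cc.contains s = true →
      cc.getD s 0 = acc →
      (∀ k, k ≠ s → cc.contains k = true → k.length ≤ s.length → cc.getD k 0 = Mz k) →
      (∀ k, s.length < k.length → cc.contains k = c.contains k ∧ cc.getD k 0 = c.getD k 0) →
      ((I.foldl (fun cc i =>
          if pvPair (PySem.List.pyGetD s 0 ' ') (PySem.List.pyGetD s i ' ') = true then
            (mzA f (PySem.List.slice s (some (i + 1)) none) (mzA f (PySem.List.slice s (some 1) (some i)) cc).2).2.modify s 0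
              (fun v => v + (mzA f (PySem.List.slice s (some 1) (some i)) cc).1 *
                (mzA f (PySem.List.slice s (some (i + 1)) none) (mzA f (PySem.List.slice s (some 1) (some i)) cc).2).1)
          else cc) cc).contains s = true)
      ∧ ((I.foldl (fun cc i =>
          if pvPair (PySem.List.pyGetD s 0 ' ') (PySem.List.pyGetD s i ' ') = true then
            (mzA f (PySem.List.slice s (some (i + 1)) none) (mzA f (PySem.List.slice s (some 1) (some i)) cc).2).2.modify s 0
              (fun v => v + (mzA f (PySem.List.slice s (some 1) (some i)) cc).1 *
                (mzA f (PySem.List.slice s (some (i + 1)) none) (mzA f (PySem.List.slice s (some 1) (some i)) cc).2).1)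
          else cc) cc).getD s 0 = I.foldl (fun acc i =>
            if pvPair (PySem.List.pyGetD s 0 ' ') (PySem.List.pyGetD s i ' ')
            then acc + Mz (PySem.List.slice s (some 1) (some i)) * Mz (PySem.List.slice s (some (i + 1)) none)
            else acc) acc)
      ∧ (∀ k, k ≠ s → (I.foldl (fun cc i =>
          if pvPair (PySem.List.pyGetD s 0 ' ') (PySem.List.pyGetD s i ' ') = true then
            (mzA f (PySem.List.slice s (some (i + 1)) none) (mzA f (PySem.List.slice s (some 1) (some i)) cc).2).2.modify s 0
              (fun v => v + (mzA f (PySem.List.slice s (some 1) (some i)) cc).1 *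
                (mzA f (PySem.List.slice s (some (i + 1)) none) (mzA f (PySem.List.slice s (some 1) (some i)) cc).2).1)
          else cc) cc).contains k = true → k.length ≤ s.length → (I.foldl (fun cc i =>
          if pvPair (PySem.List.pyGetD s 0 ' ') (PySem.List.pyGetD s i ' ') = true then
            (mzA f (PySem.List.slice s (some (i + 1)) none) (mzA f (PySem.List.slice s (some 1) (some i)) cc).2).2.modify s 0
              (fun v => v + (mzA f (PySem.List.slice s (some 1) (some i)) cc).1 *
                (mzA f (PySem.List.slice s (some (i + 1)) none) (mzA f (PySem.List.slice s (some 1) (some i)) cc).2).1)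
          else cc) cc).getD k 0 = Mz k)
      ∧ (∀ k, s.length < k.length → (I.foldl (fun cc i =>
          if pvPair (PySem.List.pyGetD s 0 ' ') (PySem.List.pyGetD s i ' ') = true then
            (mzA f (PySem.List.slice s (some (i + 1)) none) (mzA f (PySem.List.slice s (some 1) (some i)) cc).2).2.modify s 0
              (fun v => v + (mzA f (PySem.List.slice s (some 1) (some i)) cc).1 *
                (mzA f (PySem.List.slice s (some (i + 1)) none) (mzA f (PySem.List.slice s (some 1) (some i)) cc).2).1)
          else cc) cc).contains k = c.contains k ∧ (I.foldl (fun cc i =>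
          if pvPair (PySem.List.pyGetD s 0 ' ') (PySem.List.pyGetD s i ' ') = true then
            (mzA f (PySem.List.slice s (some (i + 1)) none) (mzA f (PySem.List.slice s (some 1) (some i)) cc).2).2.modify s 0
              (fun v => v + (mzA f (PySem.List.slice s (some 1) (some i)) cc).1 *
                (mzA f (PySem.List.slice s (some (i + 1)) none) (mzA f (PySem.List.slice s (some 1) (some i)) cc).2).1)
          else cc) cc).getD k 0 = c.getD k 0) := by
  intro I
  induction I with
  | nil => intro _ cc acc h1 h2 h3 h4; exact ⟨h1, h2, h3, h4⟩
  | cons i I ihI =>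
    intro hmem cc acc h1 h2 h3 h4
    have hi := hmem i (List.mem_cons_self)
    have hs2 : 2 ≤ s.length := by omega
    simp only [List.foldl_cons]
    by_cases hp : pvPair (PySem.List.pyGetD s 0 ' ') (PySem.List.pyGetD s i ' ') = true
    · rw [if_pos hp, if_pos hp]
      have ht1 : (PySem.List.slice s (some 1) (some i)).length < s.length := by
        rw [PySem.List.slice_toNat s (a := 1) (b := i) (by norm_num) (by omega)]
        simp only [List.length_take, List.length_drop]; omega
      have ht2 : (PySem.List.slice s (some (i + 1)) none).length < s.length - 1 := by
        rw [PySem.List.slice_from s (a := i + 1) (by omega)]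
        simp only [List.length_drop]; omega
      obtain ⟨ha1, ha2, ha3⟩ := HIH (PySem.List.slice s (some 1) (some i)) cc (by omega)
        (by intro k hk hkl
            exact h3 k (by intro he; subst he; omega) hk (by omega))
      obtain ⟨hb1, hb2, hb3⟩ := HIH (PySem.List.slice s (some (i + 1)) none)
        (mzA f (PySem.List.slice s (some 1) (some i)) cc).2 (by omega)
        (by intro k hk hkl
            by_cases hle : k.length ≤ (PySem.List.slice s (some 1) (some i)).length
            · exact ha2 k hk hle
            · obtain ⟨hcn, hgd⟩ := ha3 k (by omega)
              rw [hgd]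
              exact h3 k (by intro he; subst he; omega) (by rw [← hcn]; exact hk) (by omega))
      refine ihI (fun j hj => hmem j (List.mem_cons_of_mem _ hj)) _ _ ?_ ?_ ?_ ?_
      · rw [PySem.Dict.contains_modify]
        rw [(hb3 s (by omega)).1, (ha3 s (by omega)).1, h1]
        simp
      · rw [PySem.Dict.getD_modify_self]
        rw [(hb3 s (by omega)).2, (ha3 s (by omega)).2, h2, ha1, hb1]
      · intro k hks hk hkl
        rw [PySem.Dict.contains_modify] at hk
        have hbeq : (k == s) = false := by simp [hks]
        rw [hbeq] at hk; simp at hk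
        rw [PySem.Dict.getD_modify_of_ne _ _ _ hks]
        by_cases hle2 : k.length ≤ (PySem.List.slice s (some (i + 1)) none).length
        · exact hb2 k hk hle2
        · obtain ⟨hcn2, hgd2⟩ := hb3 k (by omega)
          rw [hgd2]
          by_cases hle1 : k.length ≤ (PySem.List.slice s (some 1) (some i)).length
          · exact ha2 k (by rw [← hcn2]; exact hk) hle1
          · obtain ⟨hcn1, hgd1⟩ := ha3 k (by omega)
            rw [hgd1]
            exact h3 k hks (by rw [← hcn1, ← hcn2]; exact hk) hkl
      · intro k hkl
        have hks : k ≠ s := by intro he; subst he; omega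
        obtain ⟨hcn2, hgd2⟩ := hb3 k (by omega)
        obtain ⟨hcn1, hgd1⟩ := ha3 k (by omega)
        rw [PySem.Dict.contains_modify]
        have hbeq : (k == s) = false := by simp [hks]
        rw [hbeq]
        simp only [Bool.false_or]
        rw [PySem.Dict.getD_modify_of_ne _ _ _ hks, hcn2, hcn1, hgd2, hgd1]
        exact h4 k hkl
    · rw [if_neg hp, if_neg hp]
      exact ihI (fun j hj => hmem j (List.mem_cons_of_mem _ hj)) cc acc h1 h2 h3 h4

lemma mzA_correct : ∀ (f : Nat) (s : List Char) (c : PySem.Dict (List Char) Int),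
    s.length < f →
    (∀ k, c.contains k = true → k.length ≤ s.length → c.getD k 0 = Mz k) →
    (mzA f s c).1 = Mz s
    ∧ (∀ k, (mzA f s c).2.contains k = true → k.length ≤ s.length → (mzA f s c).2.getD k 0 = Mz k)
    ∧ (∀ k, s.length < k.length →
        (mzA f s c).2.contains k = c.contains k ∧ (mzA f s c).2.getD k 0 = c.getD k 0) := by
  intro f
  induction f with
  | zero => intro s c h; omega
  | succ f ih =>
    intro s c hlt hpre
    by_cases hc : c.contains s = true
    · simp only [mzA, if_pos hc]
      exact ⟨hpre s hc le_rfl, fun k hk hkl => hpre k hk hkl, fun _ _ => by simp⟩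
    · by_cases hb : s.length = 0 ∨ s.length = 1
      · simp only [mzA, if_neg hc, if_pos hb]
        exact ⟨(Mz_small s hb).symm, fun k hk hkl => hpre k hk hkl, fun _ _ => by simp⟩
      · have hs2 : 2 ≤ s.length := by omega
        have hlen0 : (PySem.List.slice s (some 1) none).length = s.length - 1 := by
          rw [PySem.List.slice_from_one]; simp [List.length_tail]
        obtain ⟨h01, h02, h03⟩ := ih (PySem.List.slice s (some 1) none) c (by omega)
          (fun k hk hkl => hpre k hk (by omega))
        obtain ⟨hl1, hl2, hl3, hl4⟩ := mzA_loop f s c (fun t c' hlt' hpre' => ih t c' hlt' hpre') (by omega)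
          (PySem.List.pyRange 1 (s.length : Int) 1)
          (fun i hi => PySem.List.mem_pyRange_one.mp hi)
          ((mzA f (PySem.List.slice s (some 1) none) c).2.insert s
            (mzA f (PySem.List.slice s (some 1) none) c).1)
          (mzA f (PySem.List.slice s (some 1) none) c).1
          (PySem.Dict.contains_insert_self _ _ _)
          (by rw [PySem.Dict.getD_insert]; simp)
          (by intro k hks hk hkl
              rw [PySem.Dict.contains_insert] at hk
              have hbeq : (k == s) = false := by simp [hks]
              rw [hbeq] at hk; simp at hk
              rw [PySem.Dict.getD_insert, if_neg hks]
              by_cases hle : k.length ≤ (PySem.List.slice s (some 1) none).length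
              · exact h02 k hk hle
              · obtain ⟨hcn, hgd⟩ := h03 k (by omega)
                rw [hgd]
                exact hpre k (by rw [← hcn]; exact hk) hkl)
          (by intro k hkl
              have hks : k ≠ s := by intro he; subst he; omega
              have hbeq : (k == s) = false := by simp [hks]
              rw [PySem.Dict.contains_insert, hbeq, PySem.Dict.getD_insert, if_neg hks]
              simp only [Bool.false_or]
              obtain ⟨hcn, hgd⟩ := h03 k (by omega)
              exact ⟨by rw [hcn], by rw [hgd]⟩)
        simp only [mzA, if_neg hc, if_neg hb]
        have Hval : ∀ (d : PySem.Dict (List Char) Int), d.getD s 0 =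
            (PySem.List.pyRange 1 (s.length : Int) 1).foldl (fun acc i =>
              if pvPair (PySem.List.pyGetD s 0 ' ') (PySem.List.pyGetD s i ' ')
              then acc + Mz (PySem.List.slice s (some 1) (some i)) * Mz (PySem.List.slice s (some (i + 1)) none)
              else acc) (mzA f (PySem.List.slice s (some 1) none) c).1 →
            (d.modify s 0 (fun v => PySem.Int.mod v 1000000)).getD s 0 = Mz s := by
          intro d hd
          rw [PySem.Dict.getD_modify_self, hd, h01, ← Mz_unfold s hs2]
        refine ⟨Hval _ hl2, ?_, ?_⟩
        · intro k hk hkl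
          by_cases hks : k = s
          · subst hks
            exact Hval _ hl2
          · rw [PySem.Dict.contains_modify] at hk
            have hbeq : (k == s) = false := by simp [hks]
            rw [hbeq] at hk; simp at hk
            rw [PySem.Dict.getD_modify_of_ne _ _ _ hks]
            exact hl3 k hks hk hkl
        · intro k hkl
          have hks : k ≠ s := by intro he; subst he; omega
          have hbeq : (k == s) = false := by simp [hks]
          obtain ⟨hcn, hgd⟩ := hl4 k hkl
          rw [PySem.Dict.contains_modify, hbeq, PySem.Dict.getD_modify_of_ne _ _ _ hks]
          simp only [Bool.false_or]
          exact ⟨hcn, hgd⟩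

def pvSub (s : List Char) (i j : Nat) : List Char := (s.drop i).take (j - i)

lemma pvSub_length (s : List Char) (i j : Nat) (h : j ≤ s.length) : (pvSub s i j).length = j - i := by
  simp only [pvSub, List.length_take, List.length_drop]; omega

lemma pvSub_tail (s : List Char) (i j : Nat) : (pvSub s i j).tail = pvSub s (i + 1) j := by
  rw [pvSub, pvSub, ← List.drop_one, List.drop_take, List.drop_drop]
  have h2 : j - i - 1 = j - (i + 1) := by omega
  rw [h2]

lemma pvSub_getD (s : List Char) (a b m : Nat) (h : m < b - a) (h2 : a + m < s.length) :
    (pvSub s a b).getD m ' ' = s[a + m]! := by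
  have hlen : m < (pvSub s a b).length := by
    simp only [pvSub, List.length_take, List.length_drop]; omega
  rw [List.getD_eq_getElem _ _ hlen, getElem!_pos s (a + m) h2]
  simp only [pvSub, List.getElem_take, List.getElem_drop]

lemma Mz_sub (s : List Char) (i L : Nat) (h2 : 2 ≤ L) (hn : i + L ≤ s.length) :
    Mz (pvSub s i (i + L)) = PySem.Int.mod
      ((List.range' (i + 1) (L - 1)).foldl
        (fun t k => if pvPair s[i]! s[k]! then
            t + Mz (pvSub s (i + 1) k) * Mz (pvSub s (k + 1) (i + L)) else t)
        (Mz (pvSub s (i + 1) (i + L)))) 1000000 := by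
  have hlen : (pvSub s i (i + L)).length = L := by rw [pvSub_length s i (i + L) (by omega)]; omega
  rw [Mz_unfold (pvSub s i (i + L)) (by omega), hlen]
  have hcast : (((L : Int)) - 1).toNat = L - 1 := by omega
  rw [PySem.List.pyRange_one, hcast, List.foldl_map, List.range'_eq_map_range, List.foldl_map]
  have hinit : PySem.List.slice (pvSub s i (i + L)) (some 1) none = pvSub s (i + 1) (i + L) := by
    rw [PySem.List.slice_from_one, pvSub_tail]
  rw [hinit]
  congr 1
  apply PySem.List.foldl_congr_mem
  intro acc k' hk'
  rw [List.mem_range] at hk'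
  have hc2 : (1 : Int) + (k' : Int) + 1 = ((k' + 2 : Nat) : Int) := by push_cast; ring
  have hc1 : (1 : Int) + (k' : Int) = ((1 + k' : Nat) : Int) := by push_cast; ring
  have hc0 : (some (1 : Int)) = (some ((1 : Nat) : Int)) := by norm_num
  rw [hc2, hc1, hc0, PySem.List.pyGetD_zero, PySem.List.pyGetD_natCast,
      PySem.List.slice_natCast, PySem.List.slice_from_natCast]
  have e0 : (pvSub s i (i + L)).getD 0 ' ' = s[i]! := by
    have := pvSub_getD s i (i + L) 0 (by omega) (by omega)
    simpa using this
  have e1 : (pvSub s i (i + L)).getD (1 + k') ' ' = s[i + 1 + k']! := by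
    rw [pvSub_getD s i (i + L) (1 + k') (by omega) (by omega)]
    have : i + (1 + k') = i + 1 + k' := by omega
    rw [this]
  have e2 : ((pvSub s i (i + L)).drop 1).take (1 + k' - 1) = pvSub s (i + 1) (i + 1 + k') := by
    have hk : 1 + k' - 1 = k' := by omega
    rw [hk, List.drop_one, pvSub_tail, pvSub, pvSub, List.take_take]
    have : min k' ((i + L) - (i + 1)) = (i + 1 + k') - (i + 1) := by omega
    rw [this]
  have e3 : (pvSub s i (i + L)).drop (k' + 2) = pvSub s (i + 1 + k' + 1) (i + L) := by
    rw [pvSub, pvSub, List.drop_take, List.drop_drop]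
    have ha : i + L - i - (k' + 2) = i + L - (i + 1 + k' + 1) := by omega
    have hb : i + (k' + 2) = i + 1 + k' + 1 := by omega
    rw [ha, hb]
  rw [e0, e1, e2, e3]

lemma mzB_inner (s : List Char) (L : Nat) (h2 : 2 ≤ L) (hLn : L ≤ s.length) :
    ∀ (cnt i0 : Nat) (dp : Nat → Nat → Int),
    i0 + cnt ≤ s.length - L + 1 →
    (∀ a b, dp a b = if b ≤ s.length ∧ (b - a < L ∨ (b = a + L ∧ a < i0)) then Mz (pvSub s a b) else 1) →
    ∀ a b, ((List.range' i0 cnt).foldl (fun dp i =>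
        fun a b => if a = i ∧ b = i + L then PySem.Int.mod
          ((List.range' (i + 1) (L - 1)).foldl (fun t k =>
            if pvPair s[i]! s[k]! then t + dp (i + 1) k * dp (k + 1) (i + L) else t)
            (dp (i + 1) (i + L))) 1000000
          else dp a b) dp) a b
      = if b ≤ s.length ∧ (b - a < L ∨ (b = a + L ∧ a < i0 + cnt)) then Mz (pvSub s a b) else 1 := by
  intro cnt
  induction cnt with
  | zero =>
    intro i0 dp hle hdp a b
    simpa using hdp a b
  | succ cnt ih =>
    intro i0 dp hle hdp a b
    rw [List.range'_succ, List.foldl_cons]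
    have hi0n : i0 + L ≤ s.length := by omega
    have htot : PySem.Int.mod
        ((List.range' (i0 + 1) (L - 1)).foldl (fun t k =>
          if pvPair s[i0]! s[k]! then t + dp (i0 + 1) k * dp (k + 1) (i0 + L) else t)
          (dp (i0 + 1) (i0 + L))) 1000000 = Mz (pvSub s i0 (i0 + L)) := by
      have hfold : (List.range' (i0 + 1) (L - 1)).foldl (fun t k =>
          if pvPair s[i0]! s[k]! then t + dp (i0 + 1) k * dp (k + 1) (i0 + L) else t)
          (dp (i0 + 1) (i0 + L))
          = (List.range' (i0 + 1) (L - 1)).foldl (fun t k =>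
          if pvPair s[i0]! s[k]! then t + Mz (pvSub s (i0 + 1) k) * Mz (pvSub s (k + 1) (i0 + L)) else t)
          (Mz (pvSub s (i0 + 1) (i0 + L))) := by
        rw [hdp (i0 + 1) (i0 + L), if_pos (by omega)]
        apply PySem.List.foldl_congr_mem
        intro acc k hk
        rw [List.mem_range'_1] at hk
        have ha : dp (i0 + 1) k = Mz (pvSub s (i0 + 1) k) := by
          rw [hdp (i0 + 1) k, if_pos (by omega)]
        have hb : dp (k + 1) (i0 + L) = Mz (pvSub s (k + 1) (i0 + L)) := by
          rw [hdp (k + 1) (i0 + L), if_pos (by omega)]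
        rw [ha, hb]
      rw [hfold, ← Mz_sub s i0 L h2 hi0n]
    refine Eq.trans (ih (i0 + 1) _ (by omega) ?_ a b) (by split_ifs <;> first | rfl | omega)
    intro a' b'
    dsimp only
    by_cases hab : a' = i0 ∧ b' = i0 + L
    · obtain ⟨rfl, rfl⟩ := hab
      rw [if_pos ⟨rfl, rfl⟩, if_pos (by omega)]
      exact htot
    · rw [if_neg hab, hdp a' b']
      split_ifs <;> first | rfl | omega

lemma mzB_outer (s : List Char) :
    ∀ (cnt L0 : Nat) (dp : Nat → Nat → Int),
    2 ≤ L0 → L0 + cnt ≤ s.length + 1 →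
    (∀ a b, dp a b = if b ≤ s.length ∧ b - a < L0 then Mz (pvSub s a b) else 1) →
    ∀ a b, ((List.range' L0 cnt).foldl (fun dp L =>
        (List.range (s.length - L + 1)).foldl (fun dp i =>
          fun a b => if a = i ∧ b = i + L then PySem.Int.mod
            ((List.range' (i + 1) (L - 1)).foldl (fun t k =>
              if pvPair s[i]! s[k]! then t + dp (i + 1) k * dp (k + 1) (i + L) else t)
              (dp (i + 1) (i + L))) 1000000
            else dp a b) dp) dp) a b
      = if b ≤ s.length ∧ b - a < L0 + cnt then Mz (pvSub s a b) else 1 := by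
  intro cnt
  induction cnt with
  | zero =>
    intro L0 dp h2 hle hdp a b
    simpa using hdp a b
  | succ cnt ih =>
    intro L0 dp h2 hle hdp a b
    rw [List.range'_succ, List.foldl_cons]
    have hinner := mzB_inner s L0 h2 (by omega) (s.length - L0 + 1) 0 dp (by omega)
      (by intro a' b'
          rw [hdp a' b']
          split_ifs <;> first | rfl | omega)
    refine Eq.trans (ih (L0 + 1) _ (by omega) (by omega) ?_ a b) (by split_ifs <;> first | rfl | omega)
    intro a' b'
    rw [← List.range_eq_range'] at hinner
    refine Eq.trans (hinner a' b') (by split_ifs <;> first | rfl | omega)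

lemma motzkin_alt_eq_Mz (rna : String) :
    motzkin_alt rna = Mz (PySem.Chars.replace rna.toList ['\n'] []) := by
  simp only [motzkin_alt]
  generalize PySem.Chars.replace rna.toList ['\n'] [] = s
  by_cases hn1 : s.length ≤ 1
  · have h0 : s.length - 1 = 0 := by omega
    rw [h0]
    simp only [List.range', List.foldl_nil]
    rw [Mz_small s (by omega)]
  · have hout := mzB_outer s (s.length - 1) 2 (fun _ _ => (1 : Int)) le_rfl (by omega)
      (by intro a b
          split_ifs with h
          · rw [Mz_small (pvSub s a b) (by rw [pvSub_length s a b (by omega)]; omega)]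
          · rfl)
    refine Eq.trans (hout 0 s.length) ?_
    rw [if_pos (by omega)]
    simp only [pvSub, List.drop_zero, Nat.sub_zero, List.take_length]

lemma motzkin_eq_Mz (rna : String) :
    motzkin rna = Mz (PySem.Chars.replace rna.toList ['\n'] []) := by
  have h := mzA_correct ((PySem.Chars.replace rna.toList ['\n'] []).length + 1)
      (PySem.Chars.replace rna.toList ['\n'] []) PySem.Dict.empty (Nat.lt_succ_self _)
      (by intro k hk _; simp [PySem.Dict.contains_empty] at hk)
  simpa [motzkin] using h.1

-- ===== VERDICT (by name: the statement is the Claim_ definition above) =====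
theorem motzkin_spec : Claim_equal_motzkin := by
  intro rna _
  unfold Spec_motzkin
  rw [motzkin_eq_Mz, motzkin_alt_eq_Mz]
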